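-- pv_equiv track=rewrite | github.com/brianstm/NUS | CS1010E/PE1/Practice/20-21 Sem 2/Question2.py | poly_property
-- ===== SOURCE A (Python) =====
-- def poly_property(poly):
--     poly_property_dict = {'F': 'acidic', 'L': 'non-polar', 'M': 'basic', 'S': 'polar', 'P': 'acidic',
--                           'T': 'polar', 'Y': 'polar', 'O': 'non-polar', 'A': 'basic', 'Q': 'acidic', 'C': 'basic', 'R': 'basic'}
--     result = {'acidic': 0, 'basic': 0, 'polar': 0, 'non-polar': 0}
--     for i in range(len(poly)):
--         if poly[i] in poly_property_dict:
--             result[poly_property_dict[poly[i]]] = result.get(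
--                 poly_property_dict[poly[i]], 0) + 1
--     if result['acidic'] > result['basic']:
--         return 'Acidic'
--     elif result['acidic'] < result['basic']:
--         return 'Basic'
--     elif result['polar'] > result['non-polar']:
--         return 'Polar'
--     else:
--         return 'Neutral'
-- ===== SOURCE B (Python) =====
-- def poly_property(poly):
--     acidic = sum(1 for c in poly if c in 'FPQ')
--     basic = sum(1 for c in poly if c in 'MACR')
--     polar = sum(1 for c in poly if c in 'STY')
--     non_polar = sum(1 for c in poly if c in 'LO')
--     if acidic > basic:
--         return 'Acidic'
--     if acidic < basic:
--         return 'Basic'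
--     if polar > non_polar:
--         return 'Polar'
--     return 'Neutral'
-- ===== Notes on version B (the rewrite author's own statement) =====
-- stated objective: simpler
-- what changed: Replaces the single pass that maintains a letter->category dict and a mutable count dict with four independent group-membership counts (one generator-sum per category) followed by the same comparison cascade.
import Mathlib
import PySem

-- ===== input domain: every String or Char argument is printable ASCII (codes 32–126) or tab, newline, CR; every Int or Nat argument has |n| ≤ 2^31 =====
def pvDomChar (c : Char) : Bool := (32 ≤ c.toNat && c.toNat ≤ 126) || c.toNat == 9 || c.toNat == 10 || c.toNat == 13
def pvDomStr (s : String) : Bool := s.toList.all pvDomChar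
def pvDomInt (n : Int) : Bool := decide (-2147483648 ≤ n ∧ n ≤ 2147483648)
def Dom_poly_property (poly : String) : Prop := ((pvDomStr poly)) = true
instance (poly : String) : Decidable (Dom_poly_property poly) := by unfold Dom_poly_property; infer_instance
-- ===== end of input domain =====

-- B replaces A's one pass over a letter→category dict with four independent membership counts (objective: simpler).

-- ===== PORT A =====
-- the letter → property dict, and the loop body of A (one step of the for-loop)
def pvPolyDict : PySem.Dict Char String :=
  PySem.Dict.ofList [('F', "acidic"), ('L', "non-polar"), ('M', "basic"), ('S', "polar"), ('P', "acidic"),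
    ('T', "polar"), ('Y', "polar"), ('O', "non-polar"), ('A', "basic"), ('Q', "acidic"), ('C', "basic"), ('R', "basic")]

def pvStep (res : PySem.Dict String Int) (c : Char) : PySem.Dict String Int :=
  match PySem.Dict.get? pvPolyDict c with      -- 'if poly[i] in poly_property_dict'
  | some p => res.insert p (res.getD p 0 + 1)  -- result[...] = result.get(..., 0) + 1
  | none => res

def poly_property (poly : String) : String :=
  let result0 : PySem.Dict String Int :=
    PySem.Dict.ofList [("acidic", 0), ("basic", 0), ("polar", 0), ("non-polar", 0)]
  -- for i in range(len(poly)): …  (poly[i] is always in range here; the pyGetD default is never used)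
  let result := (PySem.List.pyRange 0 (PySem.Str.len poly)).foldl
    (fun res i => pvStep res (PySem.List.pyGetD poly.toList i ' ')) result0
  if result.getD "acidic" 0 > result.getD "basic" 0 then "Acidic"
  else if result.getD "acidic" 0 < result.getD "basic" 0 then "Basic"
  else if result.getD "polar" 0 > result.getD "non-polar" 0 then "Polar"
  else "Neutral"

-- ===== PORT B =====
-- sum(1 for c in poly if c in <group>)
def pvGroupSum (poly : String) (group : String) : Int :=
  ((poly.toList.filter (fun c => PySem.Str.isIn (String.ofList [c]) group)).map (fun _ => (1 : Int))).sum

def poly_property_alt (poly : String) : String :=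
  let acidic := pvGroupSum poly "FPQ"
  let basic := pvGroupSum poly "MACR"
  let polar := pvGroupSum poly "STY"
  let non_polar := pvGroupSum poly "LO"
  if acidic > basic then "Acidic"
  else if acidic < basic then "Basic"
  else if polar > non_polar then "Polar"
  else "Neutral"

-- ===== PRECONDITION & SPEC =====
def Spec_poly_property (poly : String) (out : String) : Prop := out = poly_property_alt poly
instance (poly : String) (out : String) : Decidable (Spec_poly_property poly out) := by unfold Spec_poly_property; infer_instance

-- ===== CLAIM (what is proved, stated in full; the proofs are below) =====
def Claim_equal_poly_property : Prop := ∀ (poly : String), Dom_poly_property poly → Spec_poly_property poly (poly_property poly)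

-- ===== LEMMAS AND PROOFS =====

-- the category counts after A's loop, as counts over the character list
def pvCnt (g : List Char) (cs : List Char) : Int := (cs.countP (fun c => c ∈ g) : Int)

theorem pvItems_eq : pvPolyDict.items = [('F', "acidic"), ('L', "non-polar"), ('M', "basic"),
    ('S', "polar"), ('P', "acidic"), ('T', "polar"), ('Y', "polar"), ('O', "non-polar"),
    ('A', "basic"), ('Q', "acidic"), ('C', "basic"), ('R', "basic")] := rfl

-- one loop step of A, classified by which category (if any) the character belongs to
theorem pvStep_eq (r : PySem.Dict String Int) (c : Char) : pvStep r c =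
    if c = 'F' ∨ c = 'P' ∨ c = 'Q' then r.insert "acidic" (r.getD "acidic" 0 + 1)
    else if c = 'M' ∨ c = 'A' ∨ c = 'C' ∨ c = 'R' then r.insert "basic" (r.getD "basic" 0 + 1)
    else if c = 'S' ∨ c = 'T' ∨ c = 'Y' then r.insert "polar" (r.getD "polar" 0 + 1)
    else if c = 'L' ∨ c = 'O' then r.insert "non-polar" (r.getD "non-polar" 0 + 1)
    else r := by
  by_cases hF : c = 'F'; · subst hF; rw [pvStep, show PySem.Dict.get? pvPolyDict 'F' = some "acidic" from rfl]; simp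
  by_cases hL : c = 'L'; · subst hL; rw [pvStep, show PySem.Dict.get? pvPolyDict 'L' = some "non-polar" from rfl]; simp
  by_cases hM : c = 'M'; · subst hM; rw [pvStep, show PySem.Dict.get? pvPolyDict 'M' = some "basic" from rfl]; simp
  by_cases hS : c = 'S'; · subst hS; rw [pvStep, show PySem.Dict.get? pvPolyDict 'S' = some "polar" from rfl]; simp
  by_cases hP : c = 'P'; · subst hP; rw [pvStep, show PySem.Dict.get? pvPolyDict 'P' = some "acidic" from rfl]; simp
  by_cases hT : c = 'T'; · subst hT; rw [pvStep, show PySem.Dict.get? pvPolyDict 'T' = some "polar" from rfl]; simp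
  by_cases hY : c = 'Y'; · subst hY; rw [pvStep, show PySem.Dict.get? pvPolyDict 'Y' = some "polar" from rfl]; simp
  by_cases hO : c = 'O'; · subst hO; rw [pvStep, show PySem.Dict.get? pvPolyDict 'O' = some "non-polar" from rfl]; simp
  by_cases hA : c = 'A'; · subst hA; rw [pvStep, show PySem.Dict.get? pvPolyDict 'A' = some "basic" from rfl]; simp
  by_cases hQ : c = 'Q'; · subst hQ; rw [pvStep, show PySem.Dict.get? pvPolyDict 'Q' = some "acidic" from rfl]; simp
  by_cases hC : c = 'C'; · subst hC; rw [pvStep, show PySem.Dict.get? pvPolyDict 'C' = some "basic" from rfl]; simp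
  by_cases hR : c = 'R'; · subst hR; rw [pvStep, show PySem.Dict.get? pvPolyDict 'R' = some "basic" from rfl]; simp
  have hnone : PySem.Dict.get? pvPolyDict c = none := by
    rw [PySem.Dict.get?, pvItems_eq]
    simp [List.find?_eq_none]
    exact ⟨fun h => hF h.symm, fun h => hL h.symm, fun h => hM h.symm, fun h => hS h.symm,
      fun h => hP h.symm, fun h => hT h.symm, fun h => hY h.symm, fun h => hO h.symm,
      fun h => hA h.symm, fun h => hQ h.symm, fun h => hC h.symm, fun h => hR h.symm⟩
  rw [pvStep, hnone]
  simp [hF, hL, hM, hS, hP, hT, hY, hO, hA, hQ, hC, hR]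

theorem pvLoop_counts (cs : List Char) (r : PySem.Dict String Int) :
    ((cs.foldl pvStep r).getD "acidic" 0 = r.getD "acidic" 0 + pvCnt ['F', 'P', 'Q'] cs) ∧
    ((cs.foldl pvStep r).getD "basic" 0 = r.getD "basic" 0 + pvCnt ['M', 'A', 'C', 'R'] cs) ∧
    ((cs.foldl pvStep r).getD "polar" 0 = r.getD "polar" 0 + pvCnt ['S', 'T', 'Y'] cs) ∧
    ((cs.foldl pvStep r).getD "non-polar" 0 = r.getD "non-polar" 0 + pvCnt ['L', 'O'] cs) := by
  induction cs generalizing r with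
  | nil => simp [pvCnt]
  | cons c cs ih =>
    have hs : (c :: cs).foldl pvStep r = cs.foldl pvStep (pvStep r c) := rfl
    rw [hs, pvStep_eq]
    split_ifs with g1 g2 g3 g4
    · obtain ⟨h1, h2, h3, h4⟩ := ih (r.insert "acidic" (r.getD "acidic" 0 + 1))
      rw [h1, h2, h3, h4]
      rcases g1 with rfl | rfl | rfl <;>
        simp [PySem.Dict.getD_insert, pvCnt] <;> omega
    · obtain ⟨h1, h2, h3, h4⟩ := ih (r.insert "basic" (r.getD "basic" 0 + 1))
      rw [h1, h2, h3, h4]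
      rcases g2 with rfl | rfl | rfl | rfl <;>
        simp [PySem.Dict.getD_insert, pvCnt] <;> omega
    · obtain ⟨h1, h2, h3, h4⟩ := ih (r.insert "polar" (r.getD "polar" 0 + 1))
      rw [h1, h2, h3, h4]
      rcases g3 with rfl | rfl | rfl <;>
        simp [PySem.Dict.getD_insert, pvCnt] <;> omega
    · obtain ⟨h1, h2, h3, h4⟩ := ih (r.insert "non-polar" (r.getD "non-polar" 0 + 1))
      rw [h1, h2, h3, h4]
      rcases g4 with rfl | rfl <;>
        simp [PySem.Dict.getD_insert, pvCnt] <;> omega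
    · obtain ⟨h1, h2, h3, h4⟩ := ih r
      rw [h1, h2, h3, h4]
      push Not at g1 g2 g3 g4
      simp [pvCnt, g1.1, g1.2.1, g1.2.2,
        g2.1, g2.2.1, g2.2.2.1, g2.2.2.2, g3.1, g3.2.1, g3.2.2, g4.1, g4.2]

theorem pvGroupSum_eq (poly : String) (g : String) : pvGroupSum poly g = pvCnt g.toList poly.toList := by
  simp only [pvGroupSum, pvCnt, PySem.List.sum_map_const_int, mul_one, Nat.cast_inj]
  rw [List.countP_eq_length_filter]
  congr 1
  apply List.filter_congr
  intro c _
  have hiff := PySem.Str.isIn_iff_infix (String.ofList [c]) g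
  rw [String.toList_ofList, List.singleton_infix_iff] at hiff
  by_cases h : c ∈ g.toList
  · simpa [h] using hiff.mpr h
  · simpa [h] using Bool.eq_false_iff.mpr (fun ht => h (hiff.mp ht))

theorem pvMain (poly : String) : poly_property poly = poly_property_alt poly := by
  have hr : PySem.Str.len poly = PySem.List.len poly.toList := by
    simp [PySem.Str.len_eq, PySem.List.len]
  obtain ⟨h1, h2, h3, h4⟩ := pvLoop_counts poly.toList
    (PySem.Dict.ofList [("acidic", 0), ("basic", 0), ("polar", 0), ("non-polar", 0)])
  simp only [poly_property, poly_property_alt, hr,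
    PySem.List.foldl_pyRange_pyGetD poly.toList ' ' pvStep _ (le_refl 0), Int.toNat_zero,
    List.drop_zero, h1, h2, h3, h4, pvGroupSum_eq,
    show (PySem.Dict.ofList [("acidic", (0 : Int)), ("basic", 0), ("polar", 0), ("non-polar", 0)]).getD "acidic" 0 = 0 from rfl,
    show (PySem.Dict.ofList [("acidic", (0 : Int)), ("basic", 0), ("polar", 0), ("non-polar", 0)]).getD "basic" 0 = 0 from rfl,
    show (PySem.Dict.ofList [("acidic", (0 : Int)), ("basic", 0), ("polar", 0), ("non-polar", 0)]).getD "polar" 0 = 0 from rfl,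
    show (PySem.Dict.ofList [("acidic", (0 : Int)), ("basic", 0), ("polar", 0), ("non-polar", 0)]).getD "non-polar" 0 = 0 from rfl,
    zero_add]
  rfl

-- ===== VERDICT (by name: the statement is the Claim_ definition above) =====
theorem poly_property_spec : Claim_equal_poly_property := by
  intro poly _
  exact pvMain poly
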